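-- pv_equiv track=rewrite | github.com/Airyshtoteles/learnLeetCode | Day52/Part3/celestial_shifter.py | solve_celestial_shifter
-- ===== SOURCE A (Python) =====
-- from collections import deque
--
-- def solve_celestial_shifter(grid, K):
--     R = len(grid)
--     C = len(grid[0])
--
--     start_pos = None
--     end_pos = None
--
--     for r in range(R):
--         for c in range(C):
--             if grid[r][c] == 'S':
--                 start_pos = (r, c)
--             elif grid[r][c] == 'E':
--                 end_pos = (r, c)
--
--     # Gravity: 0:D, 1:U, 2:L, 3:R
--     # Deltas for gravity
--     g_dr = [1, -1, 0, 0]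
--     g_dc = [0, 0, -1, 1]
--
--     # Initial State: (r, c, g, flips)
--     # g=0 (Down)
--     queue = deque([(start_pos[0], start_pos[1], 0, K, 0)]) # r, c, g, flips, steps
--     visited = set([(start_pos[0], start_pos[1], 0, K)])
--
--     while queue:
--         r, c, g, flips, steps = queue.popleft()
--
--         if (r, c) == end_pos:
--             return steps
--
--         # Check if falling
--         nr, nc = r + g_dr[g], c + g_dc[g]
--         is_falling = False
--
--         if 0 <= nr < R and 0 <= nc < C and grid[nr][nc] != '#':
--             is_falling = True
--
--         if is_falling:
--             # Must fall
--             if (nr, nc, g, flips) not in visited: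
--                 visited.add((nr, nc, g, flips))
--                 queue.append((nr, nc, g, flips, steps + 1))
--         else:
--             # Grounded. Can Walk or Shift.
--
--             # 1. Walk (Perpendicular)
--             # If G is D(0)/U(1), perp is L(2)/R(3)
--             # If G is L(2)/R(3), perp is U(1)/D(0)
--             perp_dirs = []
--             if g in [0, 1]:
--                 perp_dirs = [2, 3] # L, R
--             else:
--                 perp_dirs = [0, 1] # D, U (Wait, D is 0, U is 1)
--
--             for d in perp_dirs:
--                 wr, wc = r + g_dr[d], c + g_dc[d] # Use gravity deltas as move deltas
--                 # Check bounds and wall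
--                 if 0 <= wr < R and 0 <= wc < C and grid[wr][wc] != '#':
--                     if (wr, wc, g, flips) not in visited:
--                         visited.add((wr, wc, g, flips))
--                         queue.append((wr, wc, g, flips, steps + 1))
--
--             # 2. Shift Gravity
--             if flips > 0:
--                 for ng in range(4):
--                     if ng != g:
--                         if (r, c, ng, flips - 1) not in visited:
--                             visited.add((r, c, ng, flips - 1))
--                             queue.append((r, c, ng, flips - 1, steps + 1))
--
--     return -1
-- ===== SOURCE B (Python) =====
-- def solve_celestial_shifter(grid, K):
--     R = len(grid)
--     C = len(grid[0])
--
--     cells = [(r, c) for r in range(R) for c in range(C)]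
--     starts = [p for p in cells if grid[p[0]][p[1]] == 'S']
--     ends = [p for p in cells if grid[p[0]][p[1]] == 'E']
--     start = starts[-1]
--     end = ends[-1] if ends else None
--     if end is None:
--         return -1
--
--     DR = (1, -1, 0, 0)
--     DC = (0, 0, -1, 1)
--
--     def open_cell(r, c):
--         return 0 <= r < R and 0 <= c < C and grid[r][c] != '#'
--
--     def succs(s):
--         r, c, g, f = s
--         if open_cell(r + DR[g], c + DC[g]):
--             return [(r + DR[g], c + DC[g], g, f)]
--         out = [(r + DR[d], c + DC[d], g, f)
--                for d in ((2, 3) if g < 2 else (0, 1))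
--                if open_cell(r + DR[d], c + DC[d])]
--         if f > 0:
--             out += [(r, c, ng, f - 1) for ng in range(4) if ng != g]
--         return out
--
--     # Label-relaxation to a fixpoint: dist labels each discovered state with
--     # its shortest distance; each round relaxes every labelled state's edges.
--     # All edges have weight 1, so a label is final as soon as it is set and
--     # the loop may stop once some state on the end cell is labelled.
--     dist = {(start[0], start[1], 0, K): 0}
--     while not any((r, c) == end for (r, c, _, _) in dist):
--         changed = False
--         for s, d in list(dist.items()):
--             for t in succs(s):
--                 if t not in dist or dist[t] > d + 1:
--                     dist[t] = d + 1
--                     changed = True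
--         if not changed:
--             return -1
--     return min(d for (r, c, _, _), d in dist.items() if (r, c) == end)
-- ===== Notes on version B (the rewrite author's own statement) =====
-- stated objective: alternative
-- what changed: A's deque BFS with a visited set and per-node step counters is replaced by a Bellman-Ford-style label relaxation: if the grid has no end cell the answer is -1 outright, otherwise a dict mapping each discovered state to its distance is relaxed in whole-table rounds until an end-cell state is labelled or a round changes nothing, and the answer is read off as the minimum label on the end cell; there is no queue, no frontier and no visited set.
import Mathlib
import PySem

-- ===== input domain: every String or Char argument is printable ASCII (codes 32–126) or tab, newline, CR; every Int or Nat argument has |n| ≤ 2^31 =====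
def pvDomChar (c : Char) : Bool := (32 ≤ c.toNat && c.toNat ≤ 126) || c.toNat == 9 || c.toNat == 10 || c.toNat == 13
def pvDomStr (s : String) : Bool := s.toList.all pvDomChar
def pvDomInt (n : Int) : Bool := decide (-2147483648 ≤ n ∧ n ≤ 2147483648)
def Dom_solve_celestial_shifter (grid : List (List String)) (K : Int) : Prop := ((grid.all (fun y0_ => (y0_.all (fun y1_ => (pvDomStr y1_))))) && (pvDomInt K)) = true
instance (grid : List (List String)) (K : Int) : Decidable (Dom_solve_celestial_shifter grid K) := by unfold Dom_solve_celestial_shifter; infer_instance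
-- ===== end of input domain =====

-- B replaces A's deque BFS by a Bellman-Ford-style label relaxation to a fixpoint
-- with a final minimum query (objective: alternative; same answers, no speed claim).
-- Both ports use a fuel counter as a totality device; the bounds chosen exceed the
-- number of reachable states / rounds, and the proof shows the fuel never runs out.

-- shared data of both Pythons: the gravity delta tables, cell lookup (used only
-- after a bounds check, where getD never takes its default) and the open-cell test
abbrev pvSt : Type := Int × Int × Int × Int

def pvDR (g : Int) : Int := if g = 0 then 1 else if g = 1 then -1 else 0
def pvDC (g : Int) : Int := if g = 2 then -1 else if g = 3 then 1 else 0
def pvCell (grid : List (List String)) (r c : Int) : String :=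
  (grid.getD r.toNat []).getD c.toNat ""
def pvOpen (grid : List (List String)) (R C r c : Int) : Bool :=
  decide (0 ≤ r) && decide (r < R) && decide (0 ≤ c) && decide (c < C) &&
    (pvCell grid r c != "#")

-- ===== PORT A =====  (deque BFS; queue items carry their step count)

-- 'if state not in visited: visited.add(state); queue.append(state)'
def pushA (V : PySem.Set pvSt) (acc : List pvSt) (t : pvSt) : PySem.Set pvSt × List pvSt :=
  if V.contains t then (V, acc) else (V.add t, acc ++ [t])

-- the body of A's while loop after the end test: fall, or walk + shift
def stepA (grid : List (List String)) (R C : Int) (r c g fl : Int)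
    (V : PySem.Set pvSt) : PySem.Set pvSt × List pvSt :=
  let nr := r + pvDR g
  let nc := c + pvDC g
  if pvOpen grid R C nr nc then
    pushA V [] (nr, nc, g, fl)
  else
    let perp : List Int := if g = 0 ∨ g = 1 then [2, 3] else [0, 1]
    let p1 := perp.foldl (fun (p : PySem.Set pvSt × List pvSt) d =>
      if pvOpen grid R C (r + pvDR d) (c + pvDC d) then
        pushA p.1 p.2 (r + pvDR d, c + pvDC d, g, fl)
      else p) (V, [])
    if fl > 0 then
      (PySem.List.pyRange 0 4 1).foldl (fun (p : PySem.Set pvSt × List pvSt) ng =>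
        if ng != g then pushA p.1 p.2 (r, c, ng, fl - 1) else p) p1
    else p1

def aAux (grid : List (List String)) (R C : Int) (endP : Option (Int × Int)) :
    Nat → List (pvSt × Int) → PySem.Set pvSt → Int
  | _, [], _ => -1
  | 0, _ :: _, _ => -1
  | f + 1, (t, st) :: rest, V =>
    if endP = some (t.1, t.2.1) then st
    else
      let q := stepA grid R C t.1 t.2.1 t.2.2.1 t.2.2.2 V
      aAux grid R C endP f (rest ++ q.2.map (fun u => (u, st + 1))) q.1

def solve_celestial_shifter (grid : List (List String)) (K : Int) : Int :=
  let R := grid.length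
  let C := (grid.headI).length
  let se := (List.range R).foldl (fun acc r =>
    (List.range C).foldl (fun (acc : Option (Int × Int) × Option (Int × Int)) c =>
      if pvCell grid (r : Int) (c : Int) = "S" then (some ((r : Int), (c : Int)), acc.2)
      else if pvCell grid (r : Int) (c : Int) = "E" then (acc.1, some ((r : Int), (c : Int)))
      else acc) acc) (none, none)
  match se.1 with
  | none => -1   -- Python raises TypeError here (no 'S'); excluded by Pre_
  | some (sr, sc) =>
    aAux grid (R : Int) (C : Int) se.2 (R * C * 4 * (K.toNat + 1) + 1)
      [((sr, sc, 0, K), 0)] (PySem.Set.ofList [(sr, sc, 0, K)])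

-- ===== PORT B =====  (label relaxation to a fixpoint, then a minimum query)

-- succs(s) of Source B: the list of candidate successor states
def succsB (grid : List (List String)) (R C : Int) (t : pvSt) : List pvSt :=
  let r := t.1; let c := t.2.1; let g := t.2.2.1; let fl := t.2.2.2
  if pvOpen grid R C (r + pvDR g) (c + pvDC g) then
    [(r + pvDR g, c + pvDC g, g, fl)]
  else
    ((if g < 2 then [(2 : Int), 3] else [0, 1]).filter
        (fun d => pvOpen grid R C (r + pvDR d) (c + pvDC d))).map
        (fun d => (r + pvDR d, c + pvDC d, g, fl))
      ++ (if fl > 0 then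
            ((PySem.List.pyRange 0 4 1).filter (fun ng => ng != g)).map
              (fun ng => (r, c, ng, fl - 1))
          else [])

-- Source B's '(r, c) == end' test for a state
def pvIsEnd (endP : Option (Int × Int)) (t : pvSt) : Bool :=
  decide (endP = some (t.1, t.2.1))

-- Source B's inner relaxation: 'for t in succs(s): if t not in dist or dist[t] > d + 1: …'
-- (dist[t] is read only when t is in dist, where getD t 0 is exactly dist[t])
def relaxB (grid : List (List String)) (R C : Int)
    (acc : PySem.Dict pvSt Int × Bool) (it : pvSt × Int) : PySem.Dict pvSt Int × Bool :=
  (succsB grid R C it.1).foldl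
    (fun (acc : PySem.Dict pvSt Int × Bool) t =>
      if !acc.1.contains t || decide (acc.1.getD t 0 > it.2 + 1) then
        (acc.1.insert t (it.2 + 1), true)
      else acc) acc

-- Source B's while loop: stop when an end-cell state is labelled (min of its labels)
-- or when a whole round over list(dist.items()) changes nothing (-1)
def bLoop (grid : List (List String)) (R C : Int) (endP : Option (Int × Int)) :
    Nat → PySem.Dict pvSt Int → Int
  | 0, _ => -1   -- fuel, never reached for the bound chosen below
  | f + 1, dist =>
    if dist.keys.any (fun t => pvIsEnd endP t) then
      match PySem.List.min?
          ((dist.items.filter (fun p => pvIsEnd endP p.1)).map Prod.snd)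
          (fun x => x) with
      | some m => m
      | none => -1   -- unreachable: the any-test above succeeded
    else
      let q := dist.items.foldl (relaxB grid R C) (dist, false)
      if q.2 then bLoop grid R C endP f q.1 else -1

def solve_celestial_shifter_alt (grid : List (List String)) (K : Int) : Int :=
  let R := grid.length
  let C := (grid.headI).length
  let cells := (List.range R).flatMap (fun r =>
    (List.range C).map (fun c => ((r : Int), (c : Int))))
  let starts := cells.filter (fun p => pvCell grid p.1 p.2 = "S")
  let ends := cells.filter (fun p => pvCell grid p.1 p.2 = "E")
  match starts.getLast? with
  | none => -1   -- Python raises IndexError here (no 'S'); excluded by Pre_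
  | some (sr, sc) =>
    match ends.getLast? with
    | none => -1   -- Source B: no end cell at all, so the answer is -1 with no search
    | some e =>
      bLoop grid (R : Int) (C : Int) (some e) (R * C * 4 * (K.toNat + 1) + 2)
        (PySem.Dict.ofList [((sr, sc, 0, K), (0 : Int))])

-- ===== PRECONDITION & SPEC =====
-- Pre_ excludes exactly the inputs on which Python A raises: an empty grid
-- (grid[0] IndexError), a row shorter than row 0 (IndexError during the scan),
-- and a grid whose first len(grid[0]) columns contain no 'S' (start_pos stays
-- None and start_pos[0] raises TypeError).
def Pre_solve_celestial_shifter (grid : List (List String)) (K : Int) : Prop :=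
  grid ≠ [] ∧ (∀ row ∈ grid, (grid.headI).length ≤ row.length) ∧
    ∃ r < grid.length, ∃ c < (grid.headI).length, (grid.getD r []).getD c "" = "S"
instance (grid : List (List String)) (K : Int) : Decidable (Pre_solve_celestial_shifter grid K) := by
  unfold Pre_solve_celestial_shifter; infer_instance

def pvWitness_solve_celestial_shifter : List (List String) × Int := ([["S", ".", "E"]], 1)

def Spec_solve_celestial_shifter (grid : List (List String)) (K : Int) (out : Int) : Prop := out = solve_celestial_shifter_alt grid K
instance (grid : List (List String)) (K : Int) (out : Int) : Decidable (Spec_solve_celestial_shifter grid K out) := by unfold Spec_solve_celestial_shifter; infer_instance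

-- ===== CLAIM (what is proved, stated in full; the proofs are below) =====
def Claim_equal_solve_celestial_shifter : Prop := ∀ (grid : List (List String)) (K : Int), Dom_solve_celestial_shifter grid K → Pre_solve_celestial_shifter grid K → Spec_solve_celestial_shifter grid K (solve_celestial_shifter grid K)

-- ===== LEMMAS AND PROOFS =====

-- proof-side level-synchronous BFS, the bridge between the two programs:
-- pushNewB/expandB describe one BFS level, bAux the level-by-level loop

def pushNewB (V : PySem.Set pvSt) : List pvSt → PySem.Set pvSt × List pvSt
  | [] => (V, [])
  | t :: ts =>
    if V.contains t then pushNewB V ts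
    else
      let q := pushNewB (V.add t) ts
      (q.1, t :: q.2)

def expandB (grid : List (List String)) (R C : Int) :
    List pvSt → PySem.Set pvSt → PySem.Set pvSt × List pvSt
  | [], V => (V, [])
  | t :: fr, V =>
    let q1 := pushNewB V (succsB grid R C t)
    let q2 := expandB grid R C fr q1.1
    (q2.1, q1.2 ++ q2.2)

def scanB (endP : Option (Int × Int)) : Nat → List pvSt → Option (Bool × Nat)
  | f, [] => some (false, f)
  | 0, _ :: _ => none
  | f + 1, t :: fr => if endP = some (t.1, t.2.1) then some (true, f) else scanB endP f fr

theorem scanB_le (endP : Option (Int × Int)) (l : List pvSt) (f f' : Nat) (b : Bool)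
    (h : scanB endP f l = some (b, f')) : f' ≤ f := by
  induction l generalizing f with
  | nil => simp [scanB] at h; omega
  | cons x xs ih =>
    cases f with
    | zero => simp [scanB] at h
    | succ f =>
      simp only [scanB] at h
      split at h
      · simp at h; omega
      · exact Nat.le_succ_of_le (ih f h)

theorem scanB_lt (endP : Option (Int × Int)) (x : pvSt) (xs : List pvSt) (f f' : Nat)
    (b : Bool) (h : scanB endP f (x :: xs) = some (b, f')) : f' < f := by
  cases f with
  | zero => simp [scanB] at h
  | succ f =>
    simp only [scanB] at h
    split at h
    · simp at h; omega
    · exact Nat.lt_succ_of_le (scanB_le endP xs f f' b h)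

def bAux (grid : List (List String)) (R C : Int) (endP : Option (Int × Int)) :
    Nat → List pvSt → PySem.Set pvSt → Int → Int
  | _, [], _, _ => -1
  | f, t :: fr, V, step =>
    match h : scanB endP f (t :: fr) with
    | none => -1
    | some (true, _) => step
    | some (false, f') =>
      let q := expandB grid R C (t :: fr) V
      bAux grid R C endP f' q.2 q.1 (step + 1)
  termination_by f _ => f
  decreasing_by exact scanB_lt endP t fr f f' false h

-- ===== A's deque loop = the level-synchronous loop (for every fuel) =====

theorem pushA_cond_fold (l : List Int) (V : PySem.Set pvSt) (acc : List pvSt)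
    (cond : Int → Bool) (mk : Int → pvSt) :
    l.foldl (fun (p : PySem.Set pvSt × List pvSt) d =>
        if cond d then pushA p.1 p.2 (mk d) else p) (V, acc) =
      ((pushNewB V ((l.filter cond).map mk)).1,
        acc ++ (pushNewB V ((l.filter cond).map mk)).2) := by
  induction l generalizing V acc with
  | nil => simp [pushNewB]
  | cons d l ih =>
    by_cases hc : cond d
    · rw [List.foldl_cons, if_pos hc, List.filter_cons_of_pos hc, List.map_cons]
      by_cases hm : mk d ∈ V
      · have h1 : pushA V acc (mk d) = (V, acc) := by simp [pushA, hm]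
        have h2 : pushNewB V (mk d :: (l.filter cond).map mk) =
            pushNewB V ((l.filter cond).map mk) := by simp [pushNewB, hm]
        rw [h1, h2, ih]
      · have h1 : pushA V acc (mk d) = (V.add (mk d), acc ++ [mk d]) := by
          simp [pushA, hm]
        have h2 : pushNewB V (mk d :: (l.filter cond).map mk) =
            ((pushNewB (V.add (mk d)) ((l.filter cond).map mk)).1,
              mk d :: (pushNewB (V.add (mk d)) ((l.filter cond).map mk)).2) := by
          simp [pushNewB, hm]
        rw [h1, h2, ih, List.append_assoc]
        rfl
    · rw [List.foldl_cons, if_neg (by simp [hc]), List.filter_cons_of_neg (by simp [hc]), ih]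

theorem pushNewB_append (V : PySem.Set pvSt) (l₁ l₂ : List pvSt) :
    pushNewB V (l₁ ++ l₂) =
      ((pushNewB (pushNewB V l₁).1 l₂).1,
        (pushNewB V l₁).2 ++ (pushNewB (pushNewB V l₁).1 l₂).2) := by
  induction l₁ generalizing V with
  | nil => simp [pushNewB]
  | cons t l₁ ih =>
    by_cases hm : t ∈ V
    · have h1 : pushNewB V (t :: (l₁ ++ l₂)) = pushNewB V (l₁ ++ l₂) := by
        simp [pushNewB, hm]
      have h2 : pushNewB V (t :: l₁) = pushNewB V l₁ := by simp [pushNewB, hm]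
      rw [show t :: l₁ ++ l₂ = t :: (l₁ ++ l₂) from rfl, h1, h2, ih]
    · have h1 : pushNewB V (t :: (l₁ ++ l₂)) =
          ((pushNewB (V.add t) (l₁ ++ l₂)).1, t :: (pushNewB (V.add t) (l₁ ++ l₂)).2) := by
        simp [pushNewB, hm]
      have h2 : pushNewB V (t :: l₁) =
          ((pushNewB (V.add t) l₁).1, t :: (pushNewB (V.add t) l₁).2) := by
        simp [pushNewB, hm]
      rw [show t :: l₁ ++ l₂ = t :: (l₁ ++ l₂) from rfl, h1, h2, ih]
      rfl

theorem stepA_eq_pushNewB (grid : List (List String)) (R C : Int) (t : pvSt)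
    (V : PySem.Set pvSt) (hg : 0 ≤ t.2.2.1 ∧ t.2.2.1 < 4) :
    stepA grid R C t.1 t.2.1 t.2.2.1 t.2.2.2 V = pushNewB V (succsB grid R C t) := by
  obtain ⟨r, c, g, fl⟩ := t
  show stepA grid R C r c g fl V = _
  unfold stepA succsB
  by_cases hfall : pvOpen grid R C (r + pvDR g) (c + pvDC g)
  · by_cases hm : (r + pvDR g, c + pvDC g, g, fl) ∈ V <;>
      simp [hfall, pushA, pushNewB, hm]
  · have hperp : (if g = 0 ∨ g = 1 then [(2 : Int), 3] else [0, 1]) =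
        (if g < 2 then [(2 : Int), 3] else [0, 1]) := by
      have h1 : (0 : Int) ≤ g := hg.1
      have h2 : g < 4 := hg.2
      split_ifs <;> first | rfl | omega
    simp only [hfall, if_neg, Bool.false_eq_true, not_false_iff, hperp]
    rw [pushA_cond_fold]
    by_cases hfl : fl > 0
    · simp only [hfl, if_pos]
      rw [pushA_cond_fold, pushNewB_append]
      simp
    · simp only [hfl, if_neg, Bool.false_eq_true, not_false_iff, List.append_nil, if_false]
      rw [pushA_cond_fold]
      simp

theorem mem_pushNewB (V : PySem.Set pvSt) (l : List pvSt) (u : pvSt) :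
    u ∈ (pushNewB V l).2 → u ∈ l := by
  induction l generalizing V with
  | nil => intro hu; simp [pushNewB] at hu
  | cons t ts ih =>
    intro hu
    by_cases hm : t ∈ V
    · have h1 : pushNewB V (t :: ts) = pushNewB V ts := by simp [pushNewB, hm]
      rw [h1] at hu
      exact List.mem_cons_of_mem t (ih V hu)
    · have h1 : pushNewB V (t :: ts) =
          ((pushNewB (V.add t) ts).1, t :: (pushNewB (V.add t) ts).2) := by
        simp [pushNewB, hm]
      rw [h1] at hu
      rcases List.mem_cons.mp hu with hu | hu
      · simp [hu]
      · exact List.mem_cons_of_mem t (ih (V.add t) hu)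

theorem succsB_g (grid : List (List String)) (R C : Int) (t u : pvSt)
    (ht : 0 ≤ t.2.2.1 ∧ t.2.2.1 < 4) (hu : u ∈ succsB grid R C t) :
    0 ≤ u.2.2.1 ∧ u.2.2.1 < 4 := by
  obtain ⟨r, c, g, fl⟩ := t
  unfold succsB at hu
  simp only [] at hu ht ⊢
  split at hu
  · simp at hu
    subst hu
    exact ht
  · rcases List.mem_append.mp hu with hu | hu
    · rcases List.mem_map.mp hu with ⟨d, _, hd⟩
      subst hd
      exact ht
    · split at hu
      · rcases List.mem_map.mp hu with ⟨ng, hng, hd⟩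
        subst hd
        exact PySem.List.mem_pyRange_one.mp (List.mem_of_mem_filter hng)
      · simp at hu

theorem expandB_g (grid : List (List String)) (R C : Int) (fr : List pvSt)
    (V : PySem.Set pvSt) (u : pvSt)
    (hfr : ∀ t ∈ fr, 0 ≤ t.2.2.1 ∧ t.2.2.1 < 4) :
    u ∈ (expandB grid R C fr V).2 → 0 ≤ u.2.2.1 ∧ u.2.2.1 < 4 := by
  induction fr generalizing V with
  | nil => intro hu; simp [expandB] at hu
  | cons t fr ih =>
    intro hu
    have h1 : expandB grid R C (t :: fr) V =
        ((expandB grid R C fr (pushNewB V (succsB grid R C t)).1).1,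
          (pushNewB V (succsB grid R C t)).2 ++
            (expandB grid R C fr (pushNewB V (succsB grid R C t)).1).2) := by
      simp [expandB]
    rw [h1] at hu
    rcases List.mem_append.mp hu with hu | hu
    · exact succsB_g grid R C t u (hfr t (by simp)) (mem_pushNewB _ _ _ hu)
    · exact ih (pushNewB V (succsB grid R C t)).1
        (fun x hx => hfr x (List.mem_cons_of_mem t hx)) hu

theorem level_eq (grid : List (List String)) (R C : Int) (endP : Option (Int × Int))
    (pend : List pvSt) (f : Nat) (kids : List pvSt) (V : PySem.Set pvSt) (s : Int)
    (hpend : ∀ t ∈ pend, 0 ≤ t.2.2.1 ∧ t.2.2.1 < 4) :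
    aAux grid R C endP f
        (pend.map (fun t => (t, s)) ++ kids.map (fun t => (t, s + 1))) V =
      (match scanB endP f pend with
       | none => -1
       | some (true, _) => s
       | some (false, f') =>
         aAux grid R C endP f'
           ((kids ++ (expandB grid R C pend V).2).map (fun t => (t, s + 1)))
           (expandB grid R C pend V).1) := by
  induction pend generalizing f kids V with
  | nil => simp [scanB, expandB]
  | cons t pend ih =>
    cases f with
    | zero => simp [aAux, scanB]
    | succ f =>
      by_cases hend : endP = some (t.1, t.2.1)
      · simp [aAux, scanB, hend]
      · have hstep : aAux grid R C endP (f + 1)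
            ((t, s) :: (pend.map (fun u => (u, s)) ++ kids.map (fun u => (u, s + 1)))) V =
            aAux grid R C endP f
              ((pend.map (fun u => (u, s)) ++ kids.map (fun u => (u, s + 1))) ++
                (stepA grid R C t.1 t.2.1 t.2.2.1 t.2.2.2 V).2.map (fun u => (u, s + 1)))
              (stepA grid R C t.1 t.2.1 t.2.2.1 t.2.2.2 V).1 := by
          simp [aAux, hend]
        rw [List.map_cons, List.cons_append, hstep,
          stepA_eq_pushNewB grid R C t V (hpend t (by simp)),
          List.append_assoc, ← List.map_append]
        rw [ih f (kids ++ (pushNewB V (succsB grid R C t)).2)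
          (pushNewB V (succsB grid R C t)).1
          (fun u hu => hpend u (by simp [hu]))]
        have hscan : scanB endP (f + 1) (t :: pend) = scanB endP f pend := by
          simp [scanB, hend]
        have hexp : expandB grid R C (t :: pend) V =
            ((expandB grid R C pend (pushNewB V (succsB grid R C t)).1).1,
              (pushNewB V (succsB grid R C t)).2 ++
                (expandB grid R C pend (pushNewB V (succsB grid R C t)).1).2) := by
          simp [expandB]
        rw [hscan, hexp]
        cases hs : scanB endP f pend with
        | none => rfl
        | some p =>
          obtain ⟨b, f'⟩ := p
          cases b
          · simp [List.append_assoc]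
          · rfl

theorem aux_eq (grid : List (List String)) (R C : Int) (endP : Option (Int × Int))
    (f : Nat) (fr : List pvSt) (V : PySem.Set pvSt) (s : Int)
    (hfr : ∀ t ∈ fr, 0 ≤ t.2.2.1 ∧ t.2.2.1 < 4) :
    aAux grid R C endP f (fr.map (fun t => (t, s))) V = bAux grid R C endP f fr V s := by
  induction f using Nat.strong_induction_on generalizing fr V s with
  | _ f ih =>
    cases fr with
    | nil => simp [aAux, bAux]
    | cons t fr' =>
      have hlev := level_eq grid R C endP (t :: fr') f [] V s hfr
      simp only [List.map_nil, List.append_nil, List.nil_append] at hlev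
      rw [hlev, bAux]
      cases hs : scanB endP f (t :: fr') with
      | none => rfl
      | some p =>
        obtain ⟨b, f'⟩ := p
        cases b
        · have hlt := scanB_lt endP t fr' f f' false hs
          have hmem : ∀ u ∈ (expandB grid R C (t :: fr') V).2,
              0 ≤ u.2.2.1 ∧ u.2.2.1 < 4 :=
            fun u hu => expandB_g grid R C (t :: fr') V u hfr hu
          simp only []
          rw [ih f' hlt (expandB grid R C (t :: fr') V).2
            (expandB grid R C (t :: fr') V).1 (s + 1) hmem]
        · rfl

-- with no end cell, the BFS runs to exhaustion and returns -1

theorem scanB_none (f : Nat) (l : List pvSt) (b : Bool) (f' : Nat)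
    (h : scanB none f l = some (b, f')) : b = false := by
  induction l generalizing f with
  | nil => simp [scanB] at h; exact h.1
  | cons t ts ih =>
    cases f with
    | zero => simp [scanB] at h
    | succ f =>
      simp only [scanB] at h
      rw [if_neg (by simp)] at h
      exact ih f h

theorem bAux_none (grid : List (List String)) (R C : Int) (f : Nat) (F : List pvSt)
    (V : PySem.Set pvSt) (s : Int) : bAux grid R C none f F V s = -1 := by
  induction f using Nat.strong_induction_on generalizing F V s with
  | _ f ih =>
  cases F with
  | nil => simp [bAux]
  | cons t fr =>
    rw [bAux]
    cases hs : scanB none f (t :: fr) with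
    | none => rfl
    | some p =>
      obtain ⟨b, f'⟩ := p
      have hb : b = false := scanB_none f (t :: fr) b f' hs
      subst hb
      have hlt := scanB_lt none t fr f f' false hs
      simp only []
      exact ih f' hlt _ _ _

-- ===== the start/end scan of the two programs =====

theorem getLast?_cons_or {α : Type} (p : α) (fl : List α) (a : Option α) :
    ((p :: fl).getLast?).or a = (fl.getLast?).or (some p) := by
  cases h : fl.getLast? <;> simp [List.getLast?_cons, h]

theorem selLast (grid : List (List String)) (l : List (Int × Int))
    (a b : Option (Int × Int)) :
    l.foldl (fun (acc : Option (Int × Int) × Option (Int × Int)) p =>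
        if pvCell grid p.1 p.2 = "S" then (some p, acc.2)
        else if pvCell grid p.1 p.2 = "E" then (acc.1, some p) else acc) (a, b) =
      (((l.filter (fun p => pvCell grid p.1 p.2 = "S")).getLast?).or a,
        ((l.filter (fun p => pvCell grid p.1 p.2 = "E")).getLast?).or b) := by
  induction l generalizing a b with
  | nil => simp
  | cons p l ih =>
    by_cases hS : pvCell grid p.1 p.2 = "S"
    · have hE : ¬ pvCell grid p.1 p.2 = "E" := by rw [hS]; decide
      rw [List.foldl_cons, if_pos hS, ih, List.filter_cons_of_pos (by simp [hS]),
        List.filter_cons_of_neg (by simp [hE]), getLast?_cons_or]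
    · by_cases hE : pvCell grid p.1 p.2 = "E"
      · rw [List.foldl_cons, if_neg hS, if_pos hE, ih,
          List.filter_cons_of_neg (by simp [hS]),
          List.filter_cons_of_pos (by simp [hE]), getLast?_cons_or]
      · rw [List.foldl_cons, if_neg hS, if_neg hE, ih,
          List.filter_cons_of_neg (by simp [hS]),
          List.filter_cons_of_neg (by simp [hE])]

theorem scanSE_eq (grid : List (List String)) :
    ((List.range grid.length).foldl (fun acc r =>
      (List.range (grid.headI).length).foldl
        (fun (acc : Option (Int × Int) × Option (Int × Int)) c =>
          if pvCell grid (r : Int) (c : Int) = "S" then (some ((r : Int), (c : Int)), acc.2)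
          else if pvCell grid (r : Int) (c : Int) = "E" then (acc.1, some ((r : Int), (c : Int)))
          else acc) acc) (none, none)) =
      ((((List.range grid.length).flatMap (fun r =>
          (List.range (grid.headI).length).map (fun c => ((r : Int), (c : Int))))).filter
            (fun p => pvCell grid p.1 p.2 = "S")).getLast?,
        (((List.range grid.length).flatMap (fun r =>
          (List.range (grid.headI).length).map (fun c => ((r : Int), (c : Int))))).filter
            (fun p => pvCell grid p.1 p.2 = "E")).getLast?) := by
  have h1 : ∀ (init : Option (Int × Int) × Option (Int × Int)),
      (((List.range grid.length).flatMap (fun r =>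
        (List.range (grid.headI).length).map (fun c => ((r : Int), (c : Int))))).foldl
          (fun (acc : Option (Int × Int) × Option (Int × Int)) p =>
            if pvCell grid p.1 p.2 = "S" then (some p, acc.2)
            else if pvCell grid p.1 p.2 = "E" then (acc.1, some p) else acc) init) =
        ((List.range grid.length).foldl (fun acc r =>
          (List.range (grid.headI).length).foldl
            (fun (acc : Option (Int × Int) × Option (Int × Int)) c =>
              if pvCell grid (r : Int) (c : Int) = "S" then (some ((r : Int), (c : Int)), acc.2)
              else if pvCell grid (r : Int) (c : Int) = "E" then (acc.1, some ((r : Int), (c : Int)))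
              else acc) acc) init) := by
    intro init
    rw [List.foldl_flatMap]
    simp only [List.foldl_map]
  rw [← h1, selLast]
  simp

-- ===== level machinery: sets, bounds, cardinality =====

theorem pushNewB_fst (V : PySem.Set pvSt) (l : List pvSt) :
    (pushNewB V l).1 = V ++ (pushNewB V l).2 := by
  induction l generalizing V with
  | nil => simp [pushNewB]
  | cons t ts ih =>
    by_cases hm : t ∈ V
    · have h1 : pushNewB V (t :: ts) = pushNewB V ts := by simp [pushNewB, hm]
      rw [h1]
      exact ih V
    · have h1 : pushNewB V (t :: ts) =
          ((pushNewB (V.add t) ts).1, t :: (pushNewB (V.add t) ts).2) := by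
        simp [pushNewB, hm]
      have h2 : V.add t = V ++ [t] := by simp [PySem.Set.add, hm]
      rw [h1]
      show (pushNewB (V.add t) ts).1 = _
      rw [ih (V.add t), h2]
      simp

theorem pushNewB_new_not_mem (V : PySem.Set pvSt) (l : List pvSt) (u : pvSt)
    (hu : u ∈ (pushNewB V l).2) : u ∉ V := by
  induction l generalizing V with
  | nil => simp [pushNewB] at hu
  | cons t ts ih =>
    by_cases hm : t ∈ V
    · have h1 : pushNewB V (t :: ts) = pushNewB V ts := by simp [pushNewB, hm]
      rw [h1] at hu
      exact ih V hu
    · have h1 : pushNewB V (t :: ts) =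
          ((pushNewB (V.add t) ts).1, t :: (pushNewB (V.add t) ts).2) := by
        simp [pushNewB, hm]
      have h2 : V.add t = V ++ [t] := by simp [PySem.Set.add, hm]
      rw [h1] at hu
      rcases List.mem_cons.mp hu with hu | hu
      · subst hu; exact hm
      · have := ih (V.add t) hu
        rw [h2] at this
        intro hv
        exact this (by simp [hv])

theorem pushNewB_new_nodup (V : PySem.Set pvSt) (l : List pvSt) :
    (pushNewB V l).2.Nodup := by
  induction l generalizing V with
  | nil => simp [pushNewB]
  | cons t ts ih =>
    by_cases hm : t ∈ V
    · have h1 : pushNewB V (t :: ts) = pushNewB V ts := by simp [pushNewB, hm]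
      rw [h1]
      exact ih V
    · have h1 : pushNewB V (t :: ts) =
          ((pushNewB (V.add t) ts).1, t :: (pushNewB (V.add t) ts).2) := by
        simp [pushNewB, hm]
      have h2 : V.add t = V ++ [t] := by simp [PySem.Set.add, hm]
      rw [h1]
      refine List.nodup_cons.mpr ⟨?_, ih (V.add t)⟩
      intro ht
      have := pushNewB_new_not_mem (V.add t) ts t ht
      rw [h2] at this
      exact this (by simp)

theorem pushNewB_mem_fst (V : PySem.Set pvSt) (l : List pvSt) (u : pvSt)
    (hu : u ∈ V ∨ u ∈ l) : u ∈ (pushNewB V l).1 := by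
  induction l generalizing V with
  | nil => rcases hu with hu | hu
           · simpa [pushNewB] using hu
           · simp at hu
  | cons t ts ih =>
    by_cases hm : t ∈ V
    · have h1 : pushNewB V (t :: ts) = pushNewB V ts := by simp [pushNewB, hm]
      rw [h1]
      rcases hu with hu | hu
      · exact ih V (Or.inl hu)
      · rcases List.mem_cons.mp hu with hu | hu
        · subst hu; exact ih V (Or.inl hm)
        · exact ih V (Or.inr hu)
    · have h1 : pushNewB V (t :: ts) =
          ((pushNewB (V.add t) ts).1, t :: (pushNewB (V.add t) ts).2) := by
        simp [pushNewB, hm]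
      have h2 : V.add t = V ++ [t] := by simp [PySem.Set.add, hm]
      rw [h1]
      show _ ∈ (pushNewB (V.add t) ts).1
      rcases hu with hu | hu
      · exact ih (V.add t) (Or.inl (by rw [h2]; simp [hu]))
      · rcases List.mem_cons.mp hu with hu | hu
        · exact ih (V.add t) (Or.inl (by rw [h2]; simp [hu]))
        · exact ih (V.add t) (Or.inr hu)

theorem expandB_cons (grid : List (List String)) (R C : Int) (t : pvSt)
    (fr : List pvSt) (V : PySem.Set pvSt) :
    expandB grid R C (t :: fr) V =
      ((expandB grid R C fr (pushNewB V (succsB grid R C t)).1).1,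
        (pushNewB V (succsB grid R C t)).2 ++
          (expandB grid R C fr (pushNewB V (succsB grid R C t)).1).2) := by
  simp [expandB]

theorem expandB_fst (grid : List (List String)) (R C : Int) (F : List pvSt)
    (V : PySem.Set pvSt) :
    (expandB grid R C F V).1 = V ++ (expandB grid R C F V).2 := by
  induction F generalizing V with
  | nil => simp [expandB]
  | cons t fr ih =>
    rw [expandB_cons]
    show (expandB grid R C fr (pushNewB V (succsB grid R C t)).1).1 = _
    rw [ih, pushNewB_fst]
    simp

theorem expandB_new_not_mem (grid : List (List String)) (R C : Int) (F : List pvSt)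
    (V : PySem.Set pvSt) (u : pvSt) (hu : u ∈ (expandB grid R C F V).2) : u ∉ V := by
  induction F generalizing V with
  | nil => simp [expandB] at hu
  | cons t fr ih =>
    rw [expandB_cons] at hu
    rcases List.mem_append.mp hu with hu | hu
    · exact pushNewB_new_not_mem V _ u hu
    · intro hv
      have := ih (pushNewB V (succsB grid R C t)).1 hu
      rw [pushNewB_fst] at this
      exact this (by simp [hv])

theorem expandB_new_nodup (grid : List (List String)) (R C : Int) (F : List pvSt)
    (V : PySem.Set pvSt) : (expandB grid R C F V).2.Nodup := by
  induction F generalizing V with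
  | nil => simp [expandB]
  | cons t fr ih =>
    rw [expandB_cons]
    refine List.Nodup.append (pushNewB_new_nodup V _) (ih _) ?_
    intro u hu1 hu2
    have := expandB_new_not_mem grid R C fr _ u hu2
    rw [pushNewB_fst] at this
    exact this (by simp [hu1])

theorem mem_expandB_src (grid : List (List String)) (R C : Int) (F : List pvSt)
    (V : PySem.Set pvSt) (u : pvSt) (hu : u ∈ (expandB grid R C F V).2) :
    ∃ s ∈ F, u ∈ succsB grid R C s := by
  induction F generalizing V with
  | nil => simp [expandB] at hu
  | cons t fr ih =>
    rw [expandB_cons] at hu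
    rcases List.mem_append.mp hu with hu | hu
    · exact ⟨t, by simp, mem_pushNewB V _ u hu⟩
    · obtain ⟨s, hs, hsu⟩ := ih _ hu
      exact ⟨s, by simp [hs], hsu⟩

theorem expandB_closure (grid : List (List String)) (R C : Int) (F : List pvSt)
    (V : PySem.Set pvSt) (s t : pvSt) (hs : s ∈ F) (ht : t ∈ succsB grid R C s) :
    t ∈ (expandB grid R C F V).1 := by
  induction F generalizing V with
  | nil => simp at hs
  | cons x fr ih =>
    rw [expandB_cons]
    show t ∈ (expandB grid R C fr (pushNewB V (succsB grid R C x)).1).1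
    rcases List.mem_cons.mp hs with hs | hs
    · subst hs
      rw [expandB_fst]
      have : t ∈ (pushNewB V (succsB grid R C s)).1 :=
        pushNewB_mem_fst V _ t (Or.inr ht)
      simp [this]
    · exact ih _ hs

def pvInB (R C K : Int) (s : pvSt) : Prop :=
  0 ≤ s.1 ∧ s.1 < R ∧ 0 ≤ s.2.1 ∧ s.2.1 < C ∧ 0 ≤ s.2.2.1 ∧ s.2.2.1 < 4 ∧
    (s.2.2.2 = K ∨ (0 ≤ s.2.2.2 ∧ s.2.2.2 < K))

theorem pvOpen_bounds (grid : List (List String)) (R C r c : Int)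
    (h : pvOpen grid R C r c = true) : 0 ≤ r ∧ r < R ∧ 0 ≤ c ∧ c < C := by
  simp [pvOpen] at h
  tauto

theorem succsB_InB (grid : List (List String)) (R C K : Int) (s u : pvSt)
    (hs : pvInB R C K s) (hu : u ∈ succsB grid R C s) : pvInB R C K u := by
  obtain ⟨r, c, g, fl⟩ := s
  obtain ⟨hr0, hrR, hc0, hcC, hg0, hg4, hf⟩ := hs
  dsimp only at hr0 hrR hc0 hcC hg0 hg4 hf
  unfold succsB at hu
  simp only [] at hu ⊢
  split at hu
  · rename_i hop
    simp at hu
    subst hu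
    obtain ⟨h1, h2, h3, h4⟩ := pvOpen_bounds grid R C _ _ hop
    exact ⟨h1, h2, h3, h4, hg0, hg4, hf⟩
  · rcases List.mem_append.mp hu with hu | hu
    · rcases List.mem_map.mp hu with ⟨d, hd, hdu⟩
      subst hdu
      have hop := List.of_mem_filter hd
      obtain ⟨h1, h2, h3, h4⟩ := pvOpen_bounds grid R C _ _ (by simpa using hop)
      exact ⟨h1, h2, h3, h4, hg0, hg4, hf⟩
    · split at hu
      · rename_i hfl
        rcases List.mem_map.mp hu with ⟨ng, hng, hdu⟩
        subst hdu
        have hb := PySem.List.mem_pyRange_one.mp (List.mem_of_mem_filter hng)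
        refine ⟨hr0, hrR, hc0, hcC, hb.1, hb.2, Or.inr ?_⟩
        dsimp only
        rcases hf with hf | hf <;> constructor <;> omega
      · simp at hu

-- every pvInB state is a member of this explicitly enumerated list
def pvInts (N : Int) : List Int := PySem.List.pyRange 0 N 1

def pvAll (R C K : Int) : List pvSt :=
  (pvInts R).flatMap (fun r =>
    (pvInts C).flatMap (fun c =>
      ([0, 1, 2, 3] : List Int).flatMap (fun g =>
        (K :: pvInts K).map (fun f => (r, c, g, f)))))

theorem mem_pvInts (x N : Int) (h0 : 0 ≤ x) (hN : x < N) : x ∈ pvInts N := by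
  exact PySem.List.mem_pyRange_one.mpr ⟨h0, hN⟩

theorem pvAll_length (R C K : Int) :
    (pvAll R C K).length = R.toNat * C.toNat * 4 * (K.toNat + 1) := by
  simp [pvAll, pvInts, List.length_flatMap, List.map_map, Function.comp,
    PySem.List.length_pyRange_one]
  ring

theorem mem_pvAll (R C K : Int) (s : pvSt) (h : pvInB R C K s) : s ∈ pvAll R C K := by
  obtain ⟨r, c, g, f⟩ := s
  obtain ⟨hr0, hrR, hc0, hcC, hg0, hg4, hf⟩ := h
  dsimp only at hr0 hrR hc0 hcC hg0 hg4 hf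
  simp only [pvAll, List.mem_flatMap, List.mem_map, List.mem_cons]
  refine ⟨r, mem_pvInts r R hr0 hrR, c, mem_pvInts c C hc0 hcC, g, ?_, f, ?_, rfl⟩
  · have : g = 0 ∨ g = 1 ∨ g = 2 ∨ g = 3 := by omega
    rcases this with h | h | h | h <;> simp [h]
  · rcases hf with hf | hf
    · exact Or.inl hf
    · exact Or.inr (mem_pvInts f K hf.1 hf.2)

theorem card_bound (R C K : Int) (l : List pvSt) (hnd : l.Nodup)
    (hb : ∀ s ∈ l, pvInB R C K s) :
    l.length ≤ R.toNat * C.toNat * 4 * (K.toNat + 1) := by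
  have h1 : l.length = l.toFinset.card := (List.toFinset_card_of_nodup hnd).symm
  have h2 : l.toFinset ⊆ (pvAll R C K).toFinset := by
    intro x hx
    rw [List.mem_toFinset] at hx ⊢
    exact mem_pvAll R C K x (hb x hx)
  calc l.length = l.toFinset.card := h1
    _ ≤ (pvAll R C K).toFinset.card := Finset.card_le_card h2
    _ ≤ (pvAll R C K).length := List.toFinset_card_le _
    _ = _ := pvAll_length R C K

-- ===== scanB with sufficient fuel =====

theorem scanB_all_false (endP : Option (Int × Int)) (F : List pvSt) (f : Nat)
    (h : ∀ t ∈ F, ¬ endP = some (t.1, t.2.1)) (hf : F.length < f) :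
    scanB endP f F = some (false, f - F.length) := by
  induction F generalizing f with
  | nil => simp [scanB]
  | cons t F ih =>
    cases f with
    | zero => simp at hf
    | succ f =>
      simp only [scanB, if_neg (h t (by simp))]
      rw [ih f (fun u hu => h u (by simp [hu])) (by simp only [List.length_cons] at hf; omega)]
      have he : f + 1 - (t :: F).length = f - F.length := by simp
      rw [he]

theorem scanB_found (endP : Option (Int × Int)) (F : List pvSt) (f : Nat)
    (h : ∃ t ∈ F, endP = some (t.1, t.2.1)) (hf : F.length < f) :
    ∃ f', scanB endP f F = some (true, f') := by
  induction F generalizing f with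
  | nil => simp at h
  | cons t F ih =>
    cases f with
    | zero => simp at hf
    | succ f =>
      by_cases he : endP = some (t.1, t.2.1)
      · exact ⟨f, by simp [scanB, he]⟩
      · obtain ⟨u, hu, hue⟩ := h
        rcases List.mem_cons.mp hu with hu | hu
        · subst hu; exact absurd hue he
        · obtain ⟨f', hf'⟩ := ih f ⟨u, hu, hue⟩ (by simp only [List.length_cons] at hf; omega)
          exact ⟨f', by simp [scanB, he, hf']⟩

theorem min?_const (l : List Int) (v : Int) (hne : l ≠ []) (h : ∀ x ∈ l, x = v) :
    PySem.List.min? l (fun x => x) = some v := by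
  cases hm : PySem.List.min? l (fun x => x) with
  | none => exact absurd ((PySem.List.min?_eq_none_iff _ _).mp hm) hne
  | some m => rw [h m (PySem.List.min?_mem hm)]

-- ===== one relaxation round = one BFS level =====

theorem relax_inner (grid : List (List String)) (R C : Int) (d : Int) (l : List pvSt)
    (D : PySem.Dict pvSt Int) (b : Bool) (hnd : D.keys.Nodup)
    (hval : ∀ p ∈ D.items, p.2 ≤ d + 1) :
    (l.foldl (fun (acc : PySem.Dict pvSt Int × Bool) t =>
        if !acc.1.contains t || decide (acc.1.getD t 0 > d + 1) then
          (acc.1.insert t (d + 1), true)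
        else acc) (D, b)).1.items
      = D.items ++ (pushNewB D.keys l).2.map (fun t => (t, d + 1)) ∧
    (l.foldl (fun (acc : PySem.Dict pvSt Int × Bool) t =>
        if !acc.1.contains t || decide (acc.1.getD t 0 > d + 1) then
          (acc.1.insert t (d + 1), true)
        else acc) (D, b)).2
      = (b || decide ((pushNewB D.keys l).2 ≠ [])) := by
  induction l generalizing D b with
  | nil => simp [pushNewB]
  | cons t ts ih =>
    by_cases hm : t ∈ D.keys
    · have hcont : D.contains t = true := (PySem.Dict.contains_iff_mem_keys D t).mpr hm
      have hkm : t ∈ D.items.map Prod.fst := by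
        simpa only [PySem.Dict.keys] using hm
      obtain ⟨p, hp, hp1⟩ := List.mem_map.mp hkm
      have hpt : (t, p.2) ∈ D.items := by
        have : p = (t, p.2) := by
          obtain ⟨p1, p2⟩ := p
          simp at hp1
          simp [hp1]
        rwa [this] at hp
      have hg : D.getD t 0 = p.2 := by
        rw [PySem.Dict.getD_eq_get?_getD, PySem.Dict.get?_of_mem_items D hpt hnd]
        rfl
      have hcond : (!D.contains t || decide (D.getD t 0 > d + 1)) = false := by
        rw [hcont, hg]
        have := hval p hp
        simp
        omega
      have hfold : ((t :: ts).foldl (fun (acc : PySem.Dict pvSt Int × Bool) t =>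
          if !acc.1.contains t || decide (acc.1.getD t 0 > d + 1) then
            (acc.1.insert t (d + 1), true)
          else acc) (D, b))
          = (ts.foldl (fun (acc : PySem.Dict pvSt Int × Bool) t =>
          if !acc.1.contains t || decide (acc.1.getD t 0 > d + 1) then
            (acc.1.insert t (d + 1), true)
          else acc) (D, b)) := by
        simp only [List.foldl_cons, hcond, Bool.false_eq_true, if_false]
      have hpn : pushNewB D.keys (t :: ts) = pushNewB D.keys ts := by
        simp [pushNewB, hm]
      rw [hfold, hpn]
      exact ih D b hnd hval
    · have hcont : D.contains t = false := by
        rw [Bool.eq_false_iff]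
        intro h
        exact hm ((PySem.Dict.contains_iff_mem_keys D t).mp h)
      have hitems : (D.insert t (d + 1)).items = D.items ++ [(t, d + 1)] :=
        PySem.Dict.items_insert_of_not_contains D _ hcont
      have hkeys : (D.insert t (d + 1)).keys = D.keys ++ [t] :=
        PySem.Dict.keys_insert_of_not_contains D _ hcont
      have hnd' : (D.insert t (d + 1)).keys.Nodup := by
        rw [hkeys]
        refine List.Nodup.append hnd (by simp) ?_
        intro u hu hv
        simp at hv
        subst hv
        exact hm hu
      have hval' : ∀ p ∈ (D.insert t (d + 1)).items, p.2 ≤ d + 1 := by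
        rw [hitems]
        intro p hp
        rcases List.mem_append.mp hp with hp | hp
        · exact hval p hp
        · simp at hp
          simp [hp]
      have hcond : (!D.contains t || decide (D.getD t 0 > d + 1)) = true := by
        rw [hcont]
        simp
      have hfold : ((t :: ts).foldl (fun (acc : PySem.Dict pvSt Int × Bool) t =>
          if !acc.1.contains t || decide (acc.1.getD t 0 > d + 1) then
            (acc.1.insert t (d + 1), true)
          else acc) (D, b))
          = (ts.foldl (fun (acc : PySem.Dict pvSt Int × Bool) t =>
          if !acc.1.contains t || decide (acc.1.getD t 0 > d + 1) then
            (acc.1.insert t (d + 1), true)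
          else acc) (D.insert t (d + 1), true)) := by
        simp only [List.foldl_cons, hcond, if_true]
      have hsm : ¬ t ∈ (D.keys : PySem.Set pvSt) := hm
      have hpn : pushNewB D.keys (t :: ts) =
          ((pushNewB (PySem.Set.add D.keys t) ts).1,
            t :: (pushNewB (PySem.Set.add D.keys t) ts).2) := by
        simp [pushNewB, hsm]
      have hadd : PySem.Set.add D.keys t = D.keys ++ [t] := by
        simp [PySem.Set.add, hsm]
      obtain ⟨ih1, ih2⟩ := ih (D.insert t (d + 1)) true hnd' hval'
      constructor
      · rw [hfold, ih1, hitems, hpn]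
        rw [hadd, ← hkeys]
        simp
      · rw [hfold, ih2, hpn]
        simp

theorem relax_noop (grid : List (List String)) (R C : Int) (d : Int) (l : List pvSt)
    (D : PySem.Dict pvSt Int) (b : Bool)
    (h : ∀ t ∈ l, D.contains t = true ∧ D.getD t 0 ≤ d + 1) :
    (l.foldl (fun (acc : PySem.Dict pvSt Int × Bool) t =>
        if !acc.1.contains t || decide (acc.1.getD t 0 > d + 1) then
          (acc.1.insert t (d + 1), true)
        else acc) (D, b)) = (D, b) := by
  induction l with
  | nil => rfl
  | cons t ts ih =>
    have hc := h t (by simp)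
    have hcond : (!D.contains t || decide (D.getD t 0 > d + 1)) = false := by
      rw [hc.1]
      have := hc.2
      simp
      omega
    simp only [List.foldl_cons, hcond, Bool.false_eq_true, if_false]
    exact ih (fun u hu => h u (by simp [hu]))

theorem relax_pit (grid : List (List String)) (R C : Int) (Pit : List (pvSt × Int))
    (D : PySem.Dict pvSt Int) (b : Bool)
    (hval : ∀ p ∈ Pit, ∀ t ∈ succsB grid R C p.1,
      D.contains t = true ∧ D.getD t 0 ≤ p.2 + 1) :
    Pit.foldl (relaxB grid R C) (D, b) = (D, b) := by
  induction Pit with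
  | nil => rfl
  | cons p Pit ih =>
    have h1 : relaxB grid R C (D, b) p = (D, b) := by
      unfold relaxB
      exact relax_noop grid R C p.2 _ D b (hval p (by simp))
    rw [List.foldl_cons, h1]
    exact ih (fun q hq => hval q (by simp [hq]))

theorem relax_frontier (grid : List (List String)) (R C : Int) (step : Int)
    (F : List pvSt) (D : PySem.Dict pvSt Int) (b : Bool) (hnd : D.keys.Nodup)
    (hval : ∀ p ∈ D.items, p.2 ≤ step + 1) :
    ((F.map (fun t => (t, step))).foldl (relaxB grid R C) (D, b)).1.items
      = D.items ++ (expandB grid R C F D.keys).2.map (fun t => (t, step + 1)) ∧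
    ((F.map (fun t => (t, step))).foldl (relaxB grid R C) (D, b)).2
      = (b || decide ((expandB grid R C F D.keys).2 ≠ [])) := by
  induction F generalizing D b with
  | nil => simp [expandB]
  | cons s F ih =>
    have h0 : relaxB grid R C (D, b) (s, step)
        = (succsB grid R C s).foldl (fun (acc : PySem.Dict pvSt Int × Bool) t =>
            if !acc.1.contains t || decide (acc.1.getD t 0 > step + 1) then
              (acc.1.insert t (step + 1), true)
            else acc) (D, b) := rfl
    obtain ⟨hi1, hi2⟩ := relax_inner grid R C step (succsB grid R C s) D b hnd hval
    set D1 := ((succsB grid R C s).foldl (fun (acc : PySem.Dict pvSt Int × Bool) t =>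
        if !acc.1.contains t || decide (acc.1.getD t 0 > step + 1) then
          (acc.1.insert t (step + 1), true)
        else acc) (D, b)).1 with hD1
    set b1 := ((succsB grid R C s).foldl (fun (acc : PySem.Dict pvSt Int × Bool) t =>
        if !acc.1.contains t || decide (acc.1.getD t 0 > step + 1) then
          (acc.1.insert t (step + 1), true)
        else acc) (D, b)).2 with hb1
    have hkeys1 : D1.keys = (pushNewB D.keys (succsB grid R C s)).1 := by
      rw [pushNewB_fst]
      have h1 : D1.keys = D1.items.map Prod.fst := rfl
      have h2 : D.items.map Prod.fst = D.keys := rfl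
      rw [h1, hi1, List.map_append, List.map_map, h2]
      rw [show (Prod.fst ∘ fun t : pvSt => (t, step + 1)) = id from rfl, List.map_id]
    have hnd1 : D1.keys.Nodup := by
      rw [hkeys1, pushNewB_fst]
      refine List.Nodup.append hnd (pushNewB_new_nodup _ _) ?_
      intro u hu hv
      exact (pushNewB_new_not_mem _ _ u hv) hu
    have hval1 : ∀ p ∈ D1.items, p.2 ≤ step + 1 := by
      rw [hi1]
      intro p hp
      rcases List.mem_append.mp hp with hp | hp
      · exact hval p hp
      · obtain ⟨u, _, hu⟩ := List.mem_map.mp hp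
        simp [← hu]
    obtain ⟨ih1, ih2⟩ := ih D1 b1 hnd1 hval1
    have hfold : ((s :: F).map (fun t => (t, step))).foldl (relaxB grid R C) (D, b)
        = (F.map (fun t => (t, step))).foldl (relaxB grid R C) (D1, b1) := by
      rw [List.map_cons, List.foldl_cons, h0, hD1, hb1]
    rw [expandB_cons]
    constructor
    · rw [hfold, ih1, hi1, hkeys1]
      simp
    · rw [hfold, ih2, hi2, hkeys1]
      rcases b with _ | _ <;>
        rcases hq1 : (pushNewB D.keys (succsB grid R C s)).2 with _ | ⟨x, xs⟩ <;>
        simp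

-- ===== the main simulation: level-synchronous BFS = label relaxation =====

theorem dict_pair_of_mem_keys (D : PySem.Dict pvSt Int) (t : pvSt)
    (ht : t ∈ D.keys) : ∃ v, (t, v) ∈ D.items := by
  have h1 : t ∈ D.items.map Prod.fst := ht
  obtain ⟨p, hp, hp1⟩ := List.mem_map.mp h1
  refine ⟨p.2, ?_⟩
  have : p = (t, p.2) := by
    obtain ⟨p1, p2⟩ := p
    simp at hp1
    simp [hp1]
  rwa [this] at hp

theorem getD_of_pair (D : PySem.Dict pvSt Int) (t : pvSt) (v : Int)
    (hnd : D.keys.Nodup) (hp : (t, v) ∈ D.items) : D.getD t 0 = v := by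
  rw [PySem.Dict.getD_eq_get?_getD, PySem.Dict.get?_of_mem_items D hp hnd]
  rfl

theorem sim (grid : List (List String)) (R C K : Int) (endP : Option (Int × Int))
    (f1 f2 : Nat) (Pit : List (pvSt × Int)) (F : List pvSt) (step : Int)
    (dist : PySem.Dict pvSt Int)
    (hD : dist.items = Pit ++ F.map (fun t => (t, step)))
    (hnd : (Pit.map Prod.fst ++ F).Nodup)
    (hInB : ∀ s ∈ Pit.map Prod.fst ++ F, pvInB R C K s)
    (hend : ∀ p ∈ Pit, ¬ endP = some (p.1.1, p.1.2.1))
    (hval : ∀ p ∈ Pit, ∀ t ∈ succsB grid R C p.1,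
      dist.contains t = true ∧ dist.getD t 0 ≤ p.2 + 1)
    (hle : ∀ p ∈ dist.items, p.2 ≤ step)
    (hf1 : R.toNat * C.toNat * 4 * (K.toNat + 1) + 1 ≤ f1 + Pit.length)
    (hf2 : R.toNat * C.toNat * 4 * (K.toNat + 1) + 2 ≤ f2 + Pit.length + F.length) :
    bAux grid R C endP f1 F (Pit.map Prod.fst ++ F) step = bLoop grid R C endP f2 dist := by
  induction f2 using Nat.strong_induction_on generalizing f1 Pit F step dist with
  | _ f2 ih =>
  have hkeys : dist.keys = Pit.map Prod.fst ++ F := by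
    have h1 : dist.keys = dist.items.map Prod.fst := rfl
    rw [h1, hD, List.map_append, List.map_map]
    rw [show (Prod.fst ∘ fun t : pvSt => (t, step)) = id from rfl, List.map_id]
  have hndk : dist.keys.Nodup := by rw [hkeys]; exact hnd
  have hcard := card_bound R C K _ hnd hInB
  rw [List.length_append, List.length_map] at hcard
  have hf2pos : 2 ≤ f2 := by omega
  obtain ⟨f2', rfl⟩ : ∃ f2'', f2 = f2'' + 1 := ⟨f2 - 1, by omega⟩
  have hloop : bLoop grid R C endP (f2' + 1) dist =
      if dist.keys.any (fun t => pvIsEnd endP t) then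
        match PySem.List.min?
            ((dist.items.filter (fun p => pvIsEnd endP p.1)).map Prod.snd)
            (fun x => x) with
        | some m => m
        | none => -1
      else
        let q := dist.items.foldl (relaxB grid R C) (dist, false)
        if q.2 then bLoop grid R C endP f2' q.1 else -1 := by
    simp only [bLoop]
  cases F with
  | nil =>
    have hany : dist.keys.any (fun t => pvIsEnd endP t) = false := by
      rw [List.any_eq_false]
      intro u hu
      rw [hkeys] at hu
      simp only [List.append_nil] at hu
      obtain ⟨p, hp, hp1⟩ := List.mem_map.mp hu
      simp [pvIsEnd, ← hp1]
      exact hend p hp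
    have hround : dist.items.foldl (relaxB grid R C) (dist, false) = (dist, false) := by
      rw [hD]
      simp only [List.map_nil, List.append_nil]
      exact relax_pit grid R C Pit dist false hval
    rw [hloop, hany]
    simp only [Bool.false_eq_true, if_false, hround]
    simp [bAux]
  | cons t F' =>
    have hlenF : (t :: F').length < f1 := by
      have := List.length_cons (as := F') (a := t)
      omega
    by_cases hE : ∃ u ∈ t :: F', endP = some (u.1, u.2.1)
    · -- the frontier contains the end cell: both sides return step
      obtain ⟨f1', hscan⟩ := scanB_found endP (t :: F') f1 hE hlenF
      have hany : dist.keys.any (fun t => pvIsEnd endP t) = true := by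
        rw [List.any_eq_true]
        obtain ⟨u, hu, hue⟩ := hE
        refine ⟨u, ?_, by simp [pvIsEnd, hue]⟩
        rw [hkeys]
        exact List.mem_append_right _ hu
      have hfilter : (dist.items.filter (fun p => pvIsEnd endP p.1))
          = ((t :: F').filter (fun u => pvIsEnd endP u)).map (fun u => (u, step)) := by
        rw [hD, List.filter_append]
        have h1 : Pit.filter (fun p => pvIsEnd endP p.1) = [] := by
          rw [List.filter_eq_nil_iff]
          intro p hp
          simp [pvIsEnd]
          exact hend p hp
        rw [h1, List.nil_append, List.filter_map]
        rfl
      have hne : (t :: F').filter (fun u => pvIsEnd endP u) ≠ [] := by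
        obtain ⟨u, hu, hue⟩ := hE
        exact List.ne_nil_of_mem (List.mem_filter.mpr ⟨hu, by simp [pvIsEnd, hue]⟩)
      have hmin : PySem.List.min?
          ((dist.items.filter (fun p => pvIsEnd endP p.1)).map Prod.snd)
          (fun x => x) = some step := by
        rw [hfilter, List.map_map]
        apply min?_const
        · simp [hne]
        · intro x hx
          obtain ⟨u, _, hu⟩ := List.mem_map.mp hx
          simp at hu
          omega
      rw [hloop, hany]
      simp only [if_true, hmin]
      rw [bAux, hscan]
    · -- no end in the frontier: one level = one round
      push_neg at hE
      have hscan := scanB_all_false endP (t :: F') f1 hE hlenF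
      have hany : dist.keys.any (fun t => pvIsEnd endP t) = false := by
        rw [List.any_eq_false]
        intro u hu
        rw [hkeys] at hu
        rcases List.mem_append.mp hu with hu | hu
        · obtain ⟨p, hp, hp1⟩ := List.mem_map.mp hu
          simp [pvIsEnd, ← hp1]
          exact hend p hp
        · simp [pvIsEnd]
          exact hE u hu
      have hvalstep : ∀ p ∈ dist.items, p.2 ≤ step + 1 := by
        intro p hp
        have := hle p hp
        omega
      obtain ⟨hr1, hr2⟩ := relax_frontier grid R C step (t :: F') dist false hndk hvalstep
      have hsplit : dist.items.foldl (relaxB grid R C) (dist, false)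
          = ((t :: F').map (fun u => (u, step))).foldl (relaxB grid R C) (dist, false) := by
        conv_lhs => rw [hD]
        rw [List.foldl_append, relax_pit grid R C Pit dist false hval]
      set new := (expandB grid R C (t :: F') dist.keys).2 with hnewdef
      set Dq := (((t :: F').map (fun u => (u, step))).foldl (relaxB grid R C) (dist, false)).1 with hDq
      have hqitems : Dq.items = dist.items ++ new.map (fun u => (u, step + 1)) := hr1
      have hqkeys : Dq.keys = dist.keys ++ new := by
        have h1 : Dq.keys = Dq.items.map Prod.fst := rfl
        have h2 : dist.items.map Prod.fst = dist.keys := rfl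
        rw [h1, hqitems, List.map_append, List.map_map, h2]
        rw [show (Prod.fst ∘ fun u : pvSt => (u, step + 1)) = id from rfl, List.map_id]
      have hbool : (((t :: F').map (fun u => (u, step))).foldl (relaxB grid R C) (dist, false)).2
          = decide (new ≠ []) := by simpa using hr2
      -- one step of bAux, one round of bLoop
      rw [bAux, hscan, hloop, hany]
      simp only [Bool.false_eq_true, if_false]
      rw [hsplit, hbool, ← hDq]
      rw [show (Pit.map Prod.fst ++ t :: F') = dist.keys from hkeys.symm]
      by_cases hnew : new = []
      · rw [show (decide (new ≠ [])) = false by simp [hnew]]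
        simp only [Bool.false_eq_true, if_false]
        rw [← hnewdef, hnew]
        simp [bAux]
      · rw [show (decide (new ≠ [])) = true by simp [hnew]]
        simp only [if_true]
        rw [← hnewdef]
        have hPit' : (Pit ++ (t :: F').map (fun u => (u, step))).map Prod.fst
            = Pit.map Prod.fst ++ t :: F' := by
          rw [List.map_append, List.map_map]
          rw [show (Prod.fst ∘ fun u : pvSt => (u, step)) = id from rfl, List.map_id]
        have hgoalV : (expandB grid R C (t :: F') dist.keys).1
            = (Pit ++ (t :: F').map (fun u => (u, step))).map Prod.fst ++ new := by
          rw [expandB_fst, hPit', ← hnewdef, hkeys]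
        rw [hgoalV]
        -- invariants for the next level
        have hD' : Dq.items = (Pit ++ (t :: F').map (fun u => (u, step)))
            ++ new.map (fun u => (u, step + 1)) := by
          rw [hqitems, hD, List.append_assoc]
        have hnewInV : ∀ u ∈ new, u ∉ Pit.map Prod.fst ++ t :: F' := by
          intro u hu
          rw [← hkeys]
          exact expandB_new_not_mem grid R C _ _ u hu
        have hnd' : ((Pit ++ (t :: F').map (fun u => (u, step))).map Prod.fst ++ new).Nodup := by
          rw [hPit']
          exact List.Nodup.append hnd (expandB_new_nodup grid R C _ _)
            (fun u hu hv => (hnewInV u hv) hu)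
        have hInB' : ∀ u ∈ (Pit ++ (t :: F').map (fun u => (u, step))).map Prod.fst ++ new,
            pvInB R C K u := by
          rw [hPit']
          intro u hu
          rcases List.mem_append.mp hu with hu | hu
          · exact hInB u hu
          · obtain ⟨src, hsrc, husucc⟩ := mem_expandB_src grid R C _ _ u hu
            exact succsB_InB grid R C K src u
              (hInB src (List.mem_append_right _ hsrc)) husucc
        have hend' : ∀ p ∈ Pit ++ (t :: F').map (fun u => (u, step)),
            ¬ endP = some (p.1.1, p.1.2.1) := by
          intro p hp
          rcases List.mem_append.mp hp with hp | hp
          · exact hend p hp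
          · obtain ⟨u, hu, hup⟩ := List.mem_map.mp hp
            rw [← hup]
            exact hE u hu
        have hle' : ∀ p ∈ Dq.items, p.2 ≤ step + 1 := by
          intro p hp
          rw [hqitems] at hp
          rcases List.mem_append.mp hp with hp | hp
          · have := hle p hp
            omega
          · obtain ⟨u, _, hu⟩ := List.mem_map.mp hp
            simp [← hu]
        have hval' : ∀ p ∈ Pit ++ (t :: F').map (fun u => (u, step)),
            ∀ u ∈ succsB grid R C p.1,
            Dq.contains u = true ∧ Dq.getD u 0 ≤ p.2 + 1 := by
          have hndq : Dq.keys.Nodup := by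
            rw [hqkeys, hkeys]
            exact List.Nodup.append hnd (expandB_new_nodup grid R C _ _)
              (fun u hu hv => (hnewInV u hv) hu)
          intro p hp u hu
          have hmemq : u ∈ Dq.keys → Dq.contains u = true :=
            fun h => (PySem.Dict.contains_iff_mem_keys Dq u).mpr h
          rcases List.mem_append.mp hp with hp | hp
          · obtain ⟨hc, hg⟩ := hval p hp u hu
            have hukeys : u ∈ dist.keys := (PySem.Dict.contains_iff_mem_keys dist u).mp hc
            obtain ⟨v, hv⟩ := dict_pair_of_mem_keys dist u hukeys
            have hg1 : dist.getD u 0 = v := getD_of_pair dist u v hndk hv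
            have hv2 : (u, v) ∈ Dq.items := by
              rw [hqitems]
              exact List.mem_append_left _ hv
            have hg2 : Dq.getD u 0 = v := getD_of_pair Dq u v hndq hv2
            refine ⟨hmemq (by rw [hqkeys]; exact List.mem_append_left _ hukeys), ?_⟩
            rw [hg2, ← hg1]
            exact hg
          · obtain ⟨w, hw, hwp⟩ := List.mem_map.mp hp
            have hukeys : u ∈ Dq.keys := by
              rw [hqkeys, ← expandB_fst]
              exact expandB_closure grid R C _ _ w u hw (by rw [← hwp] at hu; exact hu)
            obtain ⟨v, hv⟩ := dict_pair_of_mem_keys Dq u hukeys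
            have hg2 : Dq.getD u 0 = v := getD_of_pair Dq u v hndq hv
            have hvb : v ≤ step + 1 := hle' (u, v) hv
            refine ⟨hmemq hukeys, ?_⟩
            rw [hg2, ← hwp]
            simpa using hvb
        have hf1' : R.toNat * C.toNat * 4 * (K.toNat + 1) + 1
            ≤ (f1 - (t :: F').length) + (Pit ++ (t :: F').map (fun u => (u, step))).length := by
          rw [List.length_append, List.length_map]
          omega
        have hf2' : R.toNat * C.toNat * 4 * (K.toNat + 1) + 2
            ≤ f2' + (Pit ++ (t :: F').map (fun u => (u, step))).length + new.length := by
          rw [List.length_append, List.length_map]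
          have : 1 ≤ new.length := by
            have := List.length_pos_of_ne_nil hnew
            omega
          omega
        exact ih f2' (Nat.lt_succ_self f2') (f1 - (t :: F').length)
          (Pit ++ (t :: F').map (fun u => (u, step))) new (step + 1) Dq
          hD' hnd' hInB' hend' hval' hle' hf1' hf2'
  

theorem start_mem (grid : List (List String)) (sr sc : Int)
    (h : (((List.range grid.length).flatMap (fun r =>
        (List.range (grid.headI).length).map (fun c => ((r : Int), (c : Int))))).filter
          (fun p => pvCell grid p.1 p.2 = "S")).getLast? = some (sr, sc)) :
    0 ≤ sr ∧ sr < (grid.length : Int) ∧ 0 ≤ sc ∧ sc < ((grid.headI).length : Int) := by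
  have hm := List.mem_of_getLast? h
  have hm2 := List.mem_of_mem_filter hm
  simp at hm2
  obtain ⟨⟨r, hr, hsr⟩, ⟨c, hc, hsc⟩⟩ := hm2
  subst hsr hsc
  refine ⟨Int.natCast_nonneg r, by exact_mod_cast hr, Int.natCast_nonneg c, by exact_mod_cast hc⟩

-- ===== VERDICT (by name: the statement is the Claim_ definition above) =====
theorem solve_celestial_shifter_spec : Claim_equal_solve_celestial_shifter := by
  intro grid K _ _
  unfold Spec_solve_celestial_shifter solve_celestial_shifter solve_celestial_shifter_alt
  simp only [scanSE_eq]
  cases h : (((List.range grid.length).flatMap (fun r =>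
      (List.range (grid.headI).length).map (fun c => ((r : Int), (c : Int))))).filter
        (fun p => pvCell grid p.1 p.2 = "S")).getLast? with
  | none => rfl
  | some p =>
    obtain ⟨sr, sc⟩ := p
    obtain ⟨hb1, hb2, hb3, hb4⟩ := start_mem grid sr sc h
    dsimp only
    rw [show [(((sr, sc, 0, K) : pvSt), (0 : Int))]
        = [((sr, sc, 0, K) : pvSt)].map (fun t => (t, (0 : Int))) from rfl]
    rw [aux_eq grid _ _ _ _ [(sr, sc, 0, K)] _ 0
      (by intro t ht; simp at ht; subst ht; exact ⟨le_refl 0, by norm_num⟩)]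
    have hset : PySem.Set.ofList [((sr, sc, 0, K) : pvSt)] = [((sr, sc, 0, K) : pvSt)] := rfl
    rw [hset]
    cases hEnd : (((List.range grid.length).flatMap (fun r =>
        (List.range (grid.headI).length).map (fun c => ((r : Int), (c : Int))))).filter
          (fun p => pvCell grid p.1 p.2 = "E")).getLast? with
    | none => exact bAux_none grid _ _ _ _ _ _
    | some e =>
    have hsim := sim grid (grid.length : Int) ((grid.headI).length : Int) K (some e)
      (grid.length * (grid.headI).length * 4 * (K.toNat + 1) + 1)
      (grid.length * (grid.headI).length * 4 * (K.toNat + 1) + 2)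
      [] [(sr, sc, 0, K)] 0
      (PySem.Dict.ofList [((sr, sc, 0, K), (0 : Int))])
      (by rfl)
      (by simp)
      (by
        intro u hu
        simp only [List.nil_append, List.map_nil, List.mem_singleton] at hu
        subst hu
        exact ⟨hb1, hb2, hb3, hb4, by norm_num, by norm_num, Or.inl rfl⟩)
      (by intro p hp; simp at hp)
      (by intro p hp; simp at hp)
      (by
        intro p hp
        have hsingle : (PySem.Dict.ofList [(((sr, sc, 0, K) : pvSt), (0 : Int))]).items
            = [(((sr, sc, 0, K) : pvSt), (0 : Int))] := rfl
        rw [hsingle] at hp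
        simp at hp
        simp [hp])
      (by simp)
      (by simp)
    simpa using hsim
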